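-- pv_equiv track=rewrite | github.com/kishan-kumar689/contentpilot-ai | contentpilot_app.py | build_weekly_content_plan
-- ===== SOURCE A (Python) =====
-- def build_weekly_content_plan(best_days, videos_per_week=4):
--     all_days = ["Mon", "Tue", "Wed", "Thu", "Fri", "Sat", "Sun"]
--     plan = {day: 0 for day in all_days}
--     i = 0
--     for _ in range(videos_per_week):
--         day = best_days[i % len(best_days)]
--         plan[day] += 1
--         i += 1
--     return plan
-- ===== SOURCE B (Python) =====
-- def build_weekly_content_plan(best_days, videos_per_week=4):
--     plan = {day: 0 for day in ["Mon", "Tue", "Wed", "Thu", "Fri", "Sat", "Sun"]}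
--     if videos_per_week <= 0:
--         return plan
--     q, r = divmod(videos_per_week, len(best_days))
--     for i, day in enumerate(best_days):
--         count = q + (1 if i < r else 0)
--         if count > 0:
--             plan[day] += count
--     return plan
-- ===== Notes on version B (the rewrite author's own statement) =====
-- stated objective: faster
-- what changed: Replaces the O(videos_per_week) cyclic increment loop with a closed-form divmod allocation: each position i of best_days receives q + (1 if i < r) videos in a single O(len(best_days)) pass.
import Mathlib
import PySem

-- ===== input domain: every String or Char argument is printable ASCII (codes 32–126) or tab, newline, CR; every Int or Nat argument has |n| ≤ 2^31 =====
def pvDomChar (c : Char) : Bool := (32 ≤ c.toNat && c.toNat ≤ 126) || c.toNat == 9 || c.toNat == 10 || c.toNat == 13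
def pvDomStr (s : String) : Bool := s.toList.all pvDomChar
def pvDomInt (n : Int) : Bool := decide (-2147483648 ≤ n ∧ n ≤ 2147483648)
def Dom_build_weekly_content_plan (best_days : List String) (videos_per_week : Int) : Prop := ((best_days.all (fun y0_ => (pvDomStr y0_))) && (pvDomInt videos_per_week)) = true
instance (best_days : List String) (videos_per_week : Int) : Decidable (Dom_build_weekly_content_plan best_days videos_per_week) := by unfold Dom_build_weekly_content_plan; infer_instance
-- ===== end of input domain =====

-- B replaces A's cyclic one-video-at-a-time loop (videos_per_week iterations) by a closed-form
-- divmod allocation over the positions of best_days (objective: faster).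


-- ===== PORT A =====
def build_weekly_content_plan (best_days : List String) (videos_per_week : Int) : List (String × Int) :=
  let all_days : List String := ["Mon", "Tue", "Wed", "Thu", "Fri", "Sat", "Sun"]
  let plan : PySem.Dict String Int := all_days.foldl (fun d day => d.insert day 0) PySem.Dict.empty
  -- for _ in range(videos_per_week): day = best_days[i % len(best_days)]; plan[day] += 1; i += 1
  -- plan[day] += 1 is Dict.modify (total form of the KeyError-raising update; exact under Pre_, where day is a key);
  -- best_days[i % len] is pyGetD (exact under Pre_: 0 ≤ i % len < len whenever the loop body runs)
  let final := (PySem.List.pyRange 0 videos_per_week 1).foldl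
    (fun (s : PySem.Dict String Int × Int) _ =>
      let day := PySem.List.pyGetD best_days (PySem.Int.mod s.2 (best_days.length : Int)) ""
      (s.1.modify day 0 (· + 1), s.2 + 1))
    (plan, 0)
  final.1.items

-- ===== PORT B =====
def build_weekly_content_plan_alt (best_days : List String) (videos_per_week : Int) : List (String × Int) :=
  let plan : PySem.Dict String Int :=
    (["Mon", "Tue", "Wed", "Thu", "Fri", "Sat", "Sun"] : List String).foldl
      (fun d day => d.insert day 0) PySem.Dict.empty
  if videos_per_week ≤ 0 then plan.items
  else
    -- q, r = divmod(videos_per_week, len(best_days)): total forms, exact under Pre_ (len ≠ 0 here)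
    let q := PySem.Int.floordiv videos_per_week (best_days.length : Int)
    let r := PySem.Int.mod videos_per_week (best_days.length : Int)
    let final := (PySem.List.enumerate best_days 0).foldl
      (fun d p =>
        let count := q + (if p.1 < r then (1 : Int) else 0)
        if 0 < count then d.modify p.2 0 (· + count) else d)
      plan
    final.items

-- ===== PRECONDITION & SPEC =====
-- Pre_ excludes exactly the inputs where A raises: ZeroDivisionError (best_days empty with
-- videos_per_week > 0) and KeyError (one of the first min(len(best_days), videos_per_week) positions
-- of best_days — the positions the cyclic loop actually reaches — holds a string that is not a weekday key).
def Pre_build_weekly_content_plan (best_days : List String) (videos_per_week : Int) : Prop :=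
  videos_per_week ≤ 0 ∨
    (best_days ≠ [] ∧ ∀ j : Nat, j < min best_days.length videos_per_week.toNat →
      best_days.getD j "" ∈ (["Mon", "Tue", "Wed", "Thu", "Fri", "Sat", "Sun"] : List String))
instance (best_days : List String) (videos_per_week : Int) : Decidable (Pre_build_weekly_content_plan best_days videos_per_week) := by unfold Pre_build_weekly_content_plan; infer_instance

def pvWitness_build_weekly_content_plan : List String × Int := (["Wed", "Fri", "Wed"], 8)

def Spec_build_weekly_content_plan (best_days : List String) (videos_per_week : Int) (out : List (String × Int)) : Prop := out = build_weekly_content_plan_alt best_days videos_per_week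
instance (best_days : List String) (videos_per_week : Int) (out : List (String × Int)) : Decidable (Spec_build_weekly_content_plan best_days videos_per_week out) := by unfold Spec_build_weekly_content_plan; infer_instance

-- ===== CLAIM (what is proved, stated in full; the proofs are below) =====
def Claim_equal_build_weekly_content_plan : Prop := ∀ (best_days : List String) (videos_per_week : Int), Dom_build_weekly_content_plan best_days videos_per_week → Pre_build_weekly_content_plan best_days videos_per_week → Spec_build_weekly_content_plan best_days videos_per_week (build_weekly_content_plan best_days videos_per_week)

-- ===== LEMMAS AND PROOFS =====

-- the seven weekday keys (proof-side name for the literal both ports use)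
def pvDays : List String := ["Mon", "Tue", "Wed", "Thu", "Fri", "Sat", "Sun"]
-- the seed dict {day: 0 for day in all_days} both ports build
def pvSeed : PySem.Dict String Int :=
  pvDays.foldl (fun d day => d.insert day 0) PySem.Dict.empty

theorem pvSeed_keys : pvSeed.keys = pvDays := by decide

-- A's pair-state loop (plan, i) over any list equals a plain fold over the range of counter values
theorem pv_pairfold (g : Int → PySem.Dict String Int → PySem.Dict String Int) :
    ∀ (l : List Int) (d : PySem.Dict String Int) (c : Int),
      l.foldl (fun s _ => (g s.2 s.1, s.2 + 1)) (d, c)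
        = ((PySem.List.pyRange c (c + l.length) 1).foldl (fun t i => g i t) d, c + l.length) := by
  intro l
  induction l with
  | nil => intro d c; simp [PySem.List.pyRange_one_eq_nil (le_refl c)]
  | cons x xs ih =>
    intro d c
    have h1 : c < c + (x :: xs).length := by simp only [List.length_cons]; push_cast; omega
    rw [PySem.List.pyRange_one_cons h1]
    simp only [List.foldl_cons, ih]
    have h2 : c + 1 + (xs.length : Int) = c + ((x :: xs).length : Int) := by simp; ring
    rw [h2]

-- the dict A's loop ends in, as a plain modify-fold over the visited day names
def pvDictA (bd : List String) (V : Nat) : PySem.Dict String Int :=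
  ((List.range V).map (fun k => bd.getD (k % bd.length) "")).foldl
    (fun d x => d.modify x 0 (· + 1)) pvSeed

-- the dict B's loop ends in
def pvDictB (bd : List String) (v : Int) : PySem.Dict String Int :=
  (PySem.List.enumerate bd 0).foldl
    (fun d p =>
      let count := PySem.Int.floordiv v (bd.length : Int)
        + (if p.1 < PySem.Int.mod v (bd.length : Int) then (1 : Int) else 0)
      if 0 < count then d.modify p.2 0 (· + count) else d)
    pvSeed

-- A's whole loop, normalised to pvDictA
theorem pv_A_eq (bd : List String) (v : Int) :
    build_weekly_content_plan bd v = (pvDictA bd v.toNat).items := by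
  have h0 : build_weekly_content_plan bd v
      = ((PySem.List.pyRange 0 v 1).foldl
          (fun (s : PySem.Dict String Int × Int) _ =>
            ((fun (i : Int) (t : PySem.Dict String Int) =>
                t.modify (PySem.List.pyGetD bd (PySem.Int.mod i (bd.length : Int)) "") 0 (· + 1)) s.2 s.1,
              s.2 + 1))
          (pvSeed, 0)).1.items := rfl
  rw [h0, pv_pairfold (fun (i : Int) (t : PySem.Dict String Int) =>
        t.modify (PySem.List.pyGetD bd (PySem.Int.mod i (bd.length : Int)) "") 0 (· + 1))
      (PySem.List.pyRange 0 v 1) pvSeed 0]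
  have hlen : (0 : Int) + ((PySem.List.pyRange 0 v 1).length : Int) = ((v.toNat : Nat) : Int) := by
    rw [PySem.List.length_pyRange_one]; omega
  rw [hlen, PySem.List.pyRange_zero_nat]
  unfold pvDictA
  rw [List.foldl_map, List.foldl_map]
  simp only [PySem.Int.mod_natCast, PySem.List.pyGetD_natCast]

-- B, unfolded (zeta-reduced form of the port)
theorem pv_B_eq (bd : List String) (v : Int) :
    build_weekly_content_plan_alt bd v
      = if v ≤ 0 then pvSeed.items else (pvDictB bd v).items := rfl

-- per-position count of Python's round-robin: position j of a cycle of length n gets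
-- V/n videos plus one more if j < V % n
def pvCoef (V n j : Nat) : Int := ((V / n : Nat) : Int) + (if j < V % n then 1 else 0)

theorem pvCoef_succ (V n j : Nat) (hn : 0 < n) (hj : j < n) :
    pvCoef (V + 1) n j = pvCoef V n j + (if j = V % n then 1 else 0) := by
  unfold pvCoef
  have hdiv : (V + 1) / n = V / n + if n ∣ V + 1 then 1 else 0 := Nat.succ_div
  have hmlt : V % n < n := Nat.mod_lt _ hn
  by_cases h : n ∣ V + 1
  · have hm : (V + 1) % n = 0 := Nat.mod_eq_zero_of_dvd h
    have hd : (V + 1) / n = V / n + 1 := by rw [hdiv, if_pos h]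
    have ha : V % n = n - 1 := by
      have h1 : n ∣ n * (V / n) + (V % n + 1) := by
        have h0 := Nat.div_add_mod V n
        have he : n * (V / n) + (V % n + 1) = V + 1 := by omega
        rw [he]; exact h
      have h2 : n ∣ V % n + 1 := (Nat.dvd_add_right ⟨V / n, rfl⟩).mp h1
      have h3 := Nat.le_of_dvd (by omega) h2
      omega
    rw [hd, hm, ha]
    push_cast
    split_ifs <;> omega
  · have hd : (V + 1) / n = V / n := by rw [hdiv, if_neg h]; omega
    have hm : (V + 1) % n = V % n + 1 := by
      have h1 := Nat.div_add_mod V n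
      have h2 := Nat.div_add_mod (V + 1) n
      rw [hd] at h2
      omega
    rw [hd, hm]
    push_cast
    split_ifs <;> omega

theorem pvCoef_nonneg (V n j : Nat) : 0 ≤ pvCoef V n j := by
  unfold pvCoef; split_ifs <;> positivity

-- regrouping the cyclic sum by residue class
theorem pv_core (n : Nat) (hn : 0 < n) (f : Nat → Int) :
    ∀ V : Nat, ∑ i ∈ Finset.range V, f (i % n) = ∑ j ∈ Finset.range n, pvCoef V n j * f j := by
  intro V
  induction V with
  | zero => simp [pvCoef]
  | succ V ih =>
    rw [Finset.sum_range_succ, ih]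
    have hstep : ∑ j ∈ Finset.range n, pvCoef (V + 1) n j * f j
        = ∑ j ∈ Finset.range n, (pvCoef V n j * f j + (if j = V % n then f j else 0)) := by
      apply Finset.sum_congr rfl
      intro j hj
      rw [pvCoef_succ V n j hn (Finset.mem_range.mp hj), add_mul]
      congr 1
      split_ifs <;> simp
    rw [hstep, Finset.sum_add_distrib]
    congr 1
    have hmem : V % n ∈ Finset.range n := Finset.mem_range.mpr (Nat.mod_lt _ hn)
    rw [Finset.sum_ite_eq' (Finset.range n) (V % n) f]
    simp [hmem]

-- list count as a 0/1 Finset sum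
theorem pv_count_map_range (h : Nat → String) (day : String) :
    ∀ V : Nat, ((((List.range V).map h).count day : Nat) : Int)
      = ∑ i ∈ Finset.range V, (if h i = day then (1 : Int) else 0) := by
  intro V
  induction V with
  | zero => simp
  | succ V ih =>
    rw [List.range_succ, Finset.sum_range_succ, ← ih]
    by_cases hd : h V = day <;> simp [List.count_append, hd]

-- value of B's conditional allocation loop
theorem pv_bfold (q r : Int) (day : String) :
    ∀ (bd : List String) (d : PySem.Dict String Int) (s : Int),
      ((PySem.List.enumerate bd s).foldl
          (fun d p =>
            let count := q + (if p.1 < r then (1 : Int) else 0)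
            if 0 < count then d.modify p.2 0 (· + count) else d) d).getD day 0
        = d.getD day 0 + ((PySem.List.enumerate bd s).map
            (fun p => if p.2 = day ∧ 0 < q + (if p.1 < r then (1 : Int) else 0)
                      then q + (if p.1 < r then (1 : Int) else 0) else 0)).sum := by
  intro bd
  induction bd with
  | nil => intro d s; simp [PySem.List.enumerate_nil]
  | cons x xs ih =>
    intro d s
    rw [PySem.List.enumerate_cons]
    simp only [List.foldl_cons, List.map_cons, List.sum_cons, ih]
    have hstep : ((fun d (p : Int × String) =>
            let count := q + (if p.1 < r then (1 : Int) else 0)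
            if 0 < count then d.modify p.2 0 (· + count) else d) d (s, x)).getD day 0
        = d.getD day 0 + (if x = day ∧ 0 < q + (if s < r then (1 : Int) else 0)
                      then q + (if s < r then (1 : Int) else 0) else 0) := by
      simp only
      by_cases hc : 0 < q + (if s < r then (1 : Int) else 0)
      · rw [if_pos hc, PySem.Dict.getD_modify]
        by_cases hx : day = x
        · simp [hx, hc]
        · have hnot : ¬ (x = day ∧ 0 < q + (if s < r then (1 : Int) else 0)) := by
            intro ⟨h1, _⟩; exact hx h1.symm
          simp [hx, hnot]
      · simp [hc]
    rw [hstep]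
    ring

-- a sum over enumerate as a Finset sum over positions
theorem pv_enum_sum (G : Int × String → Int) :
    ∀ (bd : List String) (s : Int),
      ((PySem.List.enumerate bd s).map G).sum
        = ∑ j ∈ Finset.range bd.length, G (s + (j : Int), bd.getD j "") := by
  intro bd
  induction bd with
  | nil => intro s; simp [PySem.List.enumerate_nil]
  | cons x xs ih =>
    intro s
    rw [PySem.List.enumerate_cons]
    simp only [List.map_cons, List.sum_cons, ih, List.length_cons]
    rw [Finset.sum_range_succ', add_comm]
    congr 1
    · apply Finset.sum_congr rfl
      intro j hj
      simp only [List.getD_cons_succ]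
      congr 2
      push_cast; ring
    · simp

-- A's visit count of a day equals B's divmod allocation to it (the heart of the equivalence)
theorem pv_values (bd : List String) (V : Nat) (hn : 0 < bd.length) (day : String) (q r : Int)
    (hq : q = ((V / bd.length : Nat) : Int)) (hr : r = ((V % bd.length : Nat) : Int)) :
    ((((List.range V).map (fun k => bd.getD (k % bd.length) "")).count day : Nat) : Int)
      = ((PySem.List.enumerate bd 0).map
          (fun p => if p.2 = day ∧ 0 < q + (if p.1 < r then (1 : Int) else 0)
                    then q + (if p.1 < r then (1 : Int) else 0) else 0)).sum := by
  rw [pv_count_map_range, pv_enum_sum]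
  have hcore := pv_core bd.length hn (fun j => if bd.getD j "" = day then (1 : Int) else 0) V
  simp only [] at hcore ⊢
  rw [hcore]
  apply Finset.sum_congr rfl
  intro j hj
  subst hq; subst hr
  have hcast : ((0 : Int) + (j : Int) < ((V % bd.length : Nat) : Int)) ↔ j < V % bd.length := by
    push_cast; omega
  have hcoef : ((V / bd.length : Nat) : Int)
      + (if (0 : Int) + (j : Int) < ((V % bd.length : Nat) : Int) then (1 : Int) else 0)
      = pvCoef V bd.length j := by
    unfold pvCoef
    congr 1
    exact if_congr hcast rfl rfl
  rw [hcoef]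
  have hnn := pvCoef_nonneg V bd.length j
  split_ifs with h1 h2 h3
  · exact mul_one _
  · have hp : ¬ 0 < pvCoef V bd.length j := fun hp => h2 ⟨h1, hp⟩
    have h0 : pvCoef V bd.length j = 0 := le_antisymm (not_lt.mp hp) hnn
    rw [h0, zero_mul]
  · exact absurd h3.1 h1
  · exact mul_zero _

-- Set.update by elements already present is the identity
theorem pv_update_of_mem (s : PySem.Set String) :
    ∀ l : List String, (∀ x ∈ l, x ∈ s) → PySem.Set.update s l = s := by
  intro l
  induction l generalizing s with
  | nil => intro _; rfl
  | cons x xs ih =>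
    intro hmem
    rw [PySem.Set.update_eq_foldl] at *
    simp only [List.foldl_cons]
    rw [PySem.Set.add_of_mem (hmem x (by simp))]
    rw [← PySem.Set.update_eq_foldl]
    exact ih s (fun y hy => hmem y (by simp [hy]))

-- keys of B's conditional loop stay pvDays when every actually-touched day is a weekday
theorem pv_bkeys (q r : Int) :
    ∀ (bd : List String) (s : Int) (d : PySem.Dict String Int), d.keys = pvDays →
      (∀ j : Nat, j < bd.length → 0 < q + (if s + (j : Int) < r then (1 : Int) else 0) →
        bd.getD j "" ∈ pvDays) →
      ((PySem.List.enumerate bd s).foldl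
          (fun d p =>
            let count := q + (if p.1 < r then (1 : Int) else 0)
            if 0 < count then d.modify p.2 0 (· + count) else d) d).keys = pvDays := by
  intro bd
  induction bd with
  | nil => intro s d hd _; simpa [PySem.List.enumerate_nil] using hd
  | cons x xs ih =>
    intro s d hd hmem
    rw [PySem.List.enumerate_cons]
    simp only [List.foldl_cons]
    apply ih (s + 1)
    · by_cases hc : 0 < q + (if s < r then (1 : Int) else 0)
      · simp only [if_pos hc]
        have hx : x ∈ pvDays := by
          have := hmem 0 (by simp) (by simpa using hc)
          simpa using this
        have hcont : d.contains x = true := by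
          rw [PySem.Dict.contains_iff_mem_keys, hd]; exact hx
        rw [PySem.Dict.keys_modify, PySem.Dict.keys_insert_of_contains _ _ hcont]
        exact hd
      · simpa [hc] using hd
    · intro j hj hc
      have harg : s + (((j + 1 : Nat)) : Int) = s + 1 + (j : Int) := by push_cast; ring
      have := hmem (j + 1) (by simpa using Nat.succ_lt_succ hj) (by rw [harg]; exact hc)
      simpa using this

-- ===== VERDICT (by name: the statement is the Claim_ definition above) =====
theorem build_weekly_content_plan_spec : Claim_equal_build_weekly_content_plan := by
  intro bd v _hdom hpre
  unfold Spec_build_weekly_content_plan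
  rw [pv_A_eq, pv_B_eq]
  by_cases hv : v ≤ 0
  · rw [if_pos hv]
    have hV0 : v.toNat = 0 := by omega
    rw [hV0]
    rfl
  · rw [if_neg hv]
    rcases hpre with hle | ⟨hne, hdays⟩
    · exact absurd hle hv
    have hn : 0 < bd.length := List.length_pos_iff.mpr hne
    have hq' : PySem.Int.floordiv v (bd.length : Int) = ((v.toNat / bd.length : Nat) : Int) := by
      conv_lhs => rw [show v = ((v.toNat : Nat) : Int) by omega]
      rw [PySem.Int.floordiv_natCast]
    have hr' : PySem.Int.mod v (bd.length : Int) = ((v.toNat % bd.length : Nat) : Int) := by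
      conv_lhs => rw [show v = ((v.toNat : Nat) : Int) by omega]
      rw [PySem.Int.mod_natCast]
    -- keys of A's dict
    have hAkeys : (pvDictA bd v.toNat).keys = pvDays := by
      unfold pvDictA
      rw [PySem.Dict.keys_foldl_modify, pvSeed_keys]
      apply pv_update_of_mem
      intro x hx
      rcases List.mem_map.mp hx with ⟨k, hk, rfl⟩
      have hk' := List.mem_range.mp hk
      have h1 : k % bd.length < bd.length := Nat.mod_lt _ hn
      have h2 : k % bd.length ≤ k := Nat.mod_le _ _
      exact hdays (k % bd.length) (by omega)
    -- touched positions in B are reached positions in A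
    have htouch : ∀ j : Nat, j < bd.length →
        0 < PySem.Int.floordiv v (bd.length : Int)
          + (if (0 : Int) + (j : Int) < PySem.Int.mod v (bd.length : Int) then (1 : Int) else 0) →
        j < min bd.length v.toNat := by
      intro j hj hpos
      rw [hq', hr'] at hpos
      by_cases hjr : j < v.toNat % bd.length
      · have := Nat.mod_le v.toNat bd.length
        have := Nat.mod_lt v.toNat hn
        omega
      · have hite : ¬ ((0 : Int) + (j : Int) < ((v.toNat % bd.length : Nat) : Int)) := by
          push_cast; omega
        rw [if_neg hite, add_zero] at hpos
        have h1 : 1 ≤ v.toNat / bd.length := by exact_mod_cast hpos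
        have h2 : bd.length ≤ v.toNat := (Nat.one_le_div_iff hn).mp h1
        omega
    -- keys of B's dict
    have hBkeys : (pvDictB bd v).keys = pvDays := by
      unfold pvDictB
      apply pv_bkeys _ _ bd 0 pvSeed pvSeed_keys
      intro j hj hpos
      exact hdays j (htouch j hj hpos)
    -- values agree at every key
    have hval : ∀ day : String, (pvDictA bd v.toNat).getD day 0 = (pvDictB bd v).getD day 0 := by
      intro day
      unfold pvDictA pvDictB
      rw [PySem.Dict.getD_foldl_modify_add_one, pv_bfold]
      congr 1
      exact pv_values bd v.toNat hn day _ _ hq' hr'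
    -- items of both dicts
    have hitemsA : (pvDictA bd v.toNat).items = pvDays.map (fun k => (k, (pvDictA bd v.toNat).getD k 0)) := by
      have h := PySem.Dict.items_eq_map_keys (pvDictA bd v.toNat) (by rw [hAkeys]; decide) 0
      rwa [hAkeys] at h
    have hitemsB : (pvDictB bd v).items = pvDays.map (fun k => (k, (pvDictB bd v).getD k 0)) := by
      have h := PySem.Dict.items_eq_map_keys (pvDictB bd v) (by rw [hBkeys]; decide) 0
      rwa [hBkeys] at h
    rw [hitemsA, hitemsB]
    exact List.map_congr_left (fun k _ => by rw [hval k])
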